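-- pv_equiv track=rewrite | github.com/pwang724/ALGORITHMS | ADNAN_AZIZ_ALGO/7/7.11.py | sinusoid
-- ===== SOURCE A (Python) =====
-- def sinusoid(s):
--     top, mid, bot = '', '', ''
--     for i, _ in enumerate(s):
--         if i % 4 == 1:
--             top += s[i]
--         elif i % 4 == 3:
--             bot += s[i]
--         else:
--             mid += s[i]
--     return top + mid + bot
-- ===== SOURCE B (Python) =====
-- def sinusoid(s):
--     # indices with i%4 in {0,2} are exactly the even indices
--     return s[1::4] + s[0::2] + s[3::4]
-- ===== Notes on version B (the rewrite author's own statement) =====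
-- stated objective: idiomatic
-- what changed: Replaces the index-mod-4 branching loop with three strided slices, fusing the two even-mod buckets into one s[0::2] slice.
import Mathlib
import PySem

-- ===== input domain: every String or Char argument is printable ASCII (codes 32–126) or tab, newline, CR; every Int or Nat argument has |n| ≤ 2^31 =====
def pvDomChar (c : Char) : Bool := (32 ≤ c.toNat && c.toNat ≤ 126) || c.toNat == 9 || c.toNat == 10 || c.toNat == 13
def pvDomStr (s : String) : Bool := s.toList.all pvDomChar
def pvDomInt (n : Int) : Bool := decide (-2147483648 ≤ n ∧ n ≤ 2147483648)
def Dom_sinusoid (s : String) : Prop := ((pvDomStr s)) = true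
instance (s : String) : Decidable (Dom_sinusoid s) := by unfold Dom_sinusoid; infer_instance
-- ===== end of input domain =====

-- B replaces A's index-mod-4 branching loop with three strided slices (s[1::4] + s[0::2] + s[3::4]); equal return value on all strings.

-- ===== PORT A =====
-- the loop index i is always a valid index of s, so pyGetD's default ' ' is never used
def sinusoid (s : String) : String :=
  let cs := s.toList
  let r := (PySem.List.enumerate cs 0).foldl
    (fun (acc : List Char × List Char × List Char) p =>
      if PySem.Int.mod p.1 4 = 1 then (acc.1 ++ [PySem.List.pyGetD cs p.1 ' '], acc.2.1, acc.2.2)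
      else if PySem.Int.mod p.1 4 = 3 then (acc.1, acc.2.1, acc.2.2 ++ [PySem.List.pyGetD cs p.1 ' '])
      else (acc.1, acc.2.1 ++ [PySem.List.pyGetD cs p.1 ' '], acc.2.2))
    ([], [], [])
  String.ofList (r.1 ++ r.2.1 ++ r.2.2)

-- ===== PORT B =====
-- s[1::4] + s[0::2] + s[3::4]; step ≠ 0 so slice? is always some, getD's default [] is never used
def sinusoid_alt (s : String) : String :=
  let cs := s.toList
  String.ofList ((PySem.List.slice? cs (some 1) none 4).getD [] ++
                 (PySem.List.slice? cs (some 0) none 2).getD [] ++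
                 (PySem.List.slice? cs (some 3) none 4).getD [])

-- ===== PRECONDITION & SPEC =====
def Spec_sinusoid (s : String) (out : String) : Prop := out = sinusoid_alt s
instance (s : String) (out : String) : Decidable (Spec_sinusoid s out) := by unfold Spec_sinusoid; infer_instance

-- ===== CLAIM (what is proved, stated in full; the proofs are below) =====
def Claim_equal_sinusoid : Prop := ∀ (s : String), Dom_sinusoid s → Spec_sinusoid s (sinusoid s)

-- ===== LEMMAS AND PROOFS =====

-- every st-th element of cs starting at index a (the normal form of a positive-step slice)
def pvStride (cs : List Char) (a st : Nat) : List Char :=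
  (List.range ((cs.length - a + st - 1) / st)).filterMap (fun k => cs[a + st * k]?)

theorem slice_eq_stride (cs : List Char) (a st : Nat) (hst : 0 < st) :
    PySem.List.slice? cs (some (a : Int)) none (st : Int) = some (pvStride cs a st) := by
  have hst' : ¬ ((st : Int) = 0) := by exact_mod_cast hst.ne'
  have hstlt : ¬ ((st : Int) < 0) := by omega
  have hnegA : ¬ ((a : Int) < 0) := by omega
  have hstpos : (0:Int) < (st:Int) := by exact_mod_cast hst
  simp only [PySem.List.slice?, PySem.List.sliceIndices, pvStride, if_neg hst', if_neg hstlt,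
    if_neg hnegA, if_pos hstpos]
  by_cases h : a < cs.length
  · have h1 : min (a:Int) (cs.length:Int) = (a:Int) := by omega
    have h2 : ((cs.length:Int) - (a:Int) + (st:Int) - 1) = ((cs.length - a + st - 1 : Nat) : Int) := by
      omega
    have h3 : (((cs.length - a + st - 1 : Nat) : Int) / (st:Int)).toNat = (cs.length - a + st - 1) / st := by
      rw [← Int.natCast_div]; exact Int.toNat_natCast _
    rw [h1, if_pos (by omega : (a:Int) < (cs.length:Int)), h2, h3]
    congr 1
  · have h1 : min (a:Int) (cs.length:Int) = (cs.length:Int) := by omega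
    have h2 : cs.length - a = 0 := by omega
    simp [h1, h2, Nat.div_eq_of_lt (by omega : st - 1 < st)]

theorem getElem?_cons4 (x1 x2 x3 x4 : Char) (l : List Char) (n : Nat) :
    (x1::x2::x3::x4::l)[n+4]? = l[n]? := by simp

theorem stride_top_step (p q r t : Char) (rest : List Char) :
    pvStride (p::q::r::t::rest) 1 4 = q :: pvStride rest 1 4 := by
  have hshift : ∀ k : Nat, (p::q::r::t::rest)[1+4*(k+1)]? = rest[1+4*k]? := by
    intro k
    rw [show 1+4*(k+1) = (1+4*k)+4 by omega, getElem?_cons4]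
  simp only [pvStride, List.length_cons]
  rw [show (rest.length+1+1+1+1 - 1 + 4 - 1)/4 = ((rest.length - 1 + 4 - 1)/4) + 1 by omega,
    List.range_succ_eq_map]
  simp [List.filterMap_map, Nat.succ_eq_add_one, hshift]

theorem stride_mid_step (p q r t : Char) (rest : List Char) :
    pvStride (p::q::r::t::rest) 0 2 = p :: r :: pvStride rest 0 2 := by
  have hshift : ∀ k : Nat, (p::q::r::t::rest)[2*(k+1+1)]? = rest[2*k]? := by
    intro k
    rw [show 2*(k+1+1) = (2*k)+4 by omega, getElem?_cons4]
  simp only [pvStride, List.length_cons]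
  rw [show (rest.length+1+1+1+1 - 0 + 2 - 1)/2 = ((rest.length - 0 + 2 - 1)/2) + 1 + 1 by omega,
    List.range_succ_eq_map, List.range_succ_eq_map]
  simp [List.filterMap_map, Nat.succ_eq_add_one, hshift]

theorem stride_bot_step (p q r t : Char) (rest : List Char) :
    pvStride (p::q::r::t::rest) 3 4 = t :: pvStride rest 3 4 := by
  have hshift : ∀ k : Nat, (p::q::r::t::rest)[3+4*(k+1)]? = rest[3+4*k]? := by
    intro k
    rw [show 3+4*(k+1) = (3+4*k)+4 by omega, getElem?_cons4]
  simp only [pvStride, List.length_cons]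
  rw [show (rest.length+1+1+1+1 - 3 + 4 - 1)/4 = ((rest.length - 3 + 4 - 1)/4) + 1 by omega,
    List.range_succ_eq_map]
  simp [List.filterMap_map, Nat.succ_eq_add_one, hshift]

-- the common shape: the three groups (top, mid, bot), computed four characters at a time
def pvGroups : List Char → List Char × List Char × List Char
  | [] => ([], [], [])
  | [a] => ([], [a], [])
  | [a, b] => ([b], [a], [])
  | [a, b, c] => ([b], [a, c], [])
  | a :: b :: c :: d :: rest =>
      let g := pvGroups rest
      (b :: g.1, a :: c :: g.2.1, d :: g.2.2)

theorem stride_eq_groups (cs : List Char) :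
    pvStride cs 1 4 = (pvGroups cs).1 ∧ pvStride cs 0 2 = (pvGroups cs).2.1 ∧
      pvStride cs 3 4 = (pvGroups cs).2.2 := by
  induction cs using pvGroups.induct with
  | case1 => refine ⟨?_, ?_, ?_⟩ <;> simp [pvStride, pvGroups, List.range_succ]
  | case2 a => refine ⟨?_, ?_, ?_⟩ <;> simp [pvStride, pvGroups, List.range_succ]
  | case3 a b => refine ⟨?_, ?_, ?_⟩ <;> simp [pvStride, pvGroups, List.range_succ]
  | case4 a b c => refine ⟨?_, ?_, ?_⟩ <;> simp [pvStride, pvGroups, List.range_succ]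
  | case5 a b c d rest ih =>
    obtain ⟨h1, h2, h3⟩ := ih
    refine ⟨?_, ?_, ?_⟩
    · rw [stride_top_step, h1]; rfl
    · rw [stride_mid_step, h2]; rfl
    · rw [stride_bot_step, h3]; rfl

-- A's loop body, with s[i] replaced by the enumerated character
def pvBody (acc : List Char × List Char × List Char) (p : Int × Char) :
    List Char × List Char × List Char :=
  if PySem.Int.mod p.1 4 = 1 then (acc.1 ++ [p.2], acc.2.1, acc.2.2)
  else if PySem.Int.mod p.1 4 = 3 then (acc.1, acc.2.1, acc.2.2 ++ [p.2])
  else (acc.1, acc.2.1 ++ [p.2], acc.2.2)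

theorem pvBody_mod0 (acc : List Char × List Char × List Char) (n : Int) (x : Char)
    (h4 : 4 ∣ n) : pvBody acc (n, x) = (acc.1, acc.2.1 ++ [x], acc.2.2) := by
  simp only [pvBody]
  rw [PySem.Int.mod_eq_emod_of_pos (by norm_num : (0:Int) < 4)]
  rw [if_neg (by omega), if_neg (by omega)]

theorem pvBody_mod1 (acc : List Char × List Char × List Char) (n : Int) (x : Char)
    (h4 : 4 ∣ n) : pvBody acc (n + 1, x) = (acc.1 ++ [x], acc.2.1, acc.2.2) := by
  simp only [pvBody]
  rw [PySem.Int.mod_eq_emod_of_pos (by norm_num : (0:Int) < 4)]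
  rw [if_pos (by omega)]

theorem pvBody_mod2 (acc : List Char × List Char × List Char) (n : Int) (x : Char)
    (h4 : 4 ∣ n) : pvBody acc (n + 1 + 1, x) = (acc.1, acc.2.1 ++ [x], acc.2.2) := by
  simp only [pvBody]
  rw [PySem.Int.mod_eq_emod_of_pos (by norm_num : (0:Int) < 4)]
  rw [if_neg (by omega), if_neg (by omega)]

theorem pvBody_mod3 (acc : List Char × List Char × List Char) (n : Int) (x : Char)
    (h4 : 4 ∣ n) : pvBody acc (n + 1 + 1 + 1, x) = (acc.1, acc.2.1, acc.2.2 ++ [x]) := by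
  simp only [pvBody]
  rw [PySem.Int.mod_eq_emod_of_pos (by norm_num : (0:Int) < 4)]
  rw [if_neg (by omega), if_pos (by omega)]

theorem loop_eq_groups (cs : List Char) : ∀ (n : Int) (t m b : List Char), 0 ≤ n → 4 ∣ n →
    (PySem.List.enumerate cs n).foldl pvBody (t, m, b) =
      (t ++ (pvGroups cs).1, m ++ (pvGroups cs).2.1, b ++ (pvGroups cs).2.2) := by
  induction cs using pvGroups.induct with
  | case1 => intro n t m b _ _; simp [PySem.List.enumerate_nil, pvGroups]
  | case2 a => intro n t m b h0 h4
               simp only [PySem.List.enumerate_cons, PySem.List.enumerate_nil, List.foldl_cons,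
                 List.foldl_nil, pvBody_mod0 _ _ _ h4]
               simp [pvGroups]
  | case3 a b => intro n t m bo h0 h4
                 simp only [PySem.List.enumerate_cons, PySem.List.enumerate_nil, List.foldl_cons,
                   List.foldl_nil, pvBody_mod0 _ _ _ h4, pvBody_mod1 _ _ _ h4]
                 simp [pvGroups]
  | case4 a b c => intro n t m bo h0 h4
                   simp only [PySem.List.enumerate_cons, PySem.List.enumerate_nil, List.foldl_cons,
                     List.foldl_nil, pvBody_mod0 _ _ _ h4, pvBody_mod1 _ _ _ h4,
                     pvBody_mod2 _ _ _ h4]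
                   simp [pvGroups]
  | case5 a b c d rest ih =>
    intro n t m bo h0 h4
    simp only [PySem.List.enumerate_cons, List.foldl_cons,
      pvBody_mod0 _ _ _ h4, pvBody_mod1 _ _ _ h4, pvBody_mod2 _ _ _ h4,
      pvBody_mod3 _ _ _ h4]
    rw [ih (n + 1 + 1 + 1 + 1) _ _ _ (by omega) (by omega)]
    simp [pvGroups]

theorem enum_get (cs : List Char) : ∀ (n : Int) (p : Int × Char),
    p ∈ PySem.List.enumerate cs n → 0 ≤ p.1 - n ∧ cs[(p.1 - n).toNat]? = some p.2 := by
  induction cs with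
  | nil => intro n p h; simp [PySem.List.enumerate_nil] at h
  | cons x xs ih =>
    intro n p h
    rw [PySem.List.enumerate_cons] at h
    rcases List.mem_cons.mp h with h | h
    · subst h; simp
    · obtain ⟨h1, h2⟩ := ih (n+1) p h
      refine ⟨by omega, ?_⟩
      rw [show (p.1 - n).toNat = (p.1 - (n+1)).toNat + 1 by omega]
      simpa using h2

theorem enum_getD (cs : List Char) (p : Int × Char) (hp : p ∈ PySem.List.enumerate cs 0) :
    PySem.List.pyGetD cs p.1 ' ' = p.2 := by
  obtain ⟨h1, h2⟩ := enum_get cs 0 p hp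
  have h2' : cs[p.1.toNat]? = some p.2 := by simpa using h2
  rw [PySem.List.pyGetD_of_nonneg _ _ (by omega)]
  simp [List.getD_eq_getElem?_getD, h2']

-- ===== VERDICT (by name: the statement is the Claim_ definition above) =====
theorem sinusoid_spec : Claim_equal_sinusoid := by
  intro s _
  simp only [Spec_sinusoid, sinusoid, sinusoid_alt]
  rw [PySem.List.foldl_congr_mem _ _ pvBody _
    (fun acc p hp => by simp only [pvBody]; rw [enum_getD s.toList p hp])]
  rw [loop_eq_groups s.toList 0 [] [] [] le_rfl ⟨0, rfl⟩]
  have t14 := slice_eq_stride s.toList 1 4 (by norm_num)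
  have t02 := slice_eq_stride s.toList 0 2 (by norm_num)
  have t34 := slice_eq_stride s.toList 3 4 (by norm_num)
  norm_num at t14 t02 t34
  obtain ⟨g1, g2, g3⟩ := stride_eq_groups s.toList
  simp [t14, t02, t34, g1, g2, g3]
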